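-- pv_equiv track=rewrite | github.com/mwisnowski/mtg_python_deckbuilder | code/web/routes/commanders.py | _color_label_from_code
-- ===== SOURCE A (Python) =====
-- _COLOR_NAMES: dict[str, str] = {
--     "W": "White",
--     "U": "Blue",
--     "B": "Black",
--     "R": "Red",
--     "G": "Green",
--     "C": "Colorless",
-- }
--
-- _TWO_COLOR_LABELS: dict[str, str] = {
--     "WU": "Azorius",
--     "UB": "Dimir",
--     "BR": "Rakdos",
--     "RG": "Gruul",
--     "WG": "Selesnya",
--     "WB": "Orzhov",
--     "UR": "Izzet",
--     "BG": "Golgari",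
--     "WR": "Boros",
--     "UG": "Simic",
-- }
--
-- _THREE_COLOR_LABELS: dict[str, str] = {
--     "WUB": "Esper",
--     "UBR": "Grixis",
--     "BRG": "Jund",
--     "WRG": "Naya",
--     "WUG": "Bant",
--     "WBR": "Mardu",
--     "WUR": "Jeskai",
--     "UBG": "Sultai",
--     "URG": "Temur",
--     "WBG": "Abzan",
-- }
--
-- _FOUR_COLOR_LABELS: dict[str, str] = {
--     "WUBR": "Yore-Tiller",
--     "WUBG": "Witch-Maw",
--     "WURG": "Ink-Treader",
--     "WBRG": "Dune-Brood",
--     "UBRG": "Glint-Eye",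
-- }
--
-- def _color_label_from_code(code: str) -> str:
--     if not code:
--         return ""
--     if code == "C":
--         return "Colorless (C)"
--     if len(code) == 1:
--         base = _COLOR_NAMES.get(code, code)
--         return f"{base} ({code})"
--     if len(code) == 2:
--         label = _TWO_COLOR_LABELS.get(code)
--         if label:
--             return f"{label} ({code})"
--     if len(code) == 3:
--         label = _THREE_COLOR_LABELS.get(code)
--         if label:
--             return f"{label} ({code})"
--     if len(code) == 4:
--         label = _FOUR_COLOR_LABELS.get(code)
--         if label:
--             return f"{label} ({code})"
--     if code == "WUBRG":
--         return "Five-Color (WUBRG)"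
--     parts = [_COLOR_NAMES.get(ch, ch) for ch in code]
--     pretty = " / ".join(parts)
--     return f"{pretty} ({code})"
-- ===== SOURCE B (Python) =====
-- _COLOR_NAMES = {
--     "W": "White",
--     "U": "Blue",
--     "B": "Black",
--     "R": "Red",
--     "G": "Green",
--     "C": "Colorless",
-- }
--
-- _ORDER = "WUBRG"
--
-- # Names indexed by the 5-bit color mask (bit 0 = W ... bit 4 = G); index 0 unused.
-- _MASK_NAMES = [
--     "", "White", "Blue", "Azorius", "Black", "Orzhov", "Dimir", "Esper",
--     "Red", "Boros", "Izzet", "Jeskai", "Rakdos", "Mardu", "Grixis", "Yore-Tiller",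
--     "Green", "Selesnya", "Simic", "Bant", "Golgari", "Abzan", "Sultai", "Witch-Maw",
--     "Gruul", "Naya", "Temur", "Ink-Treader", "Jund", "Dune-Brood", "Glint-Eye", "Five-Color",
-- ]
--
--
-- def _color_label_from_code(code: str) -> str:
--     if not code:
--         return ""
--     # Single left-to-right scan: build the color bitmask while checking that the
--     # characters are distinct colors in canonical WUBRG order; any violation
--     # (unknown char, repeat, wrong order) invalidates the mask.
--     mask = 0
--     last = -1
--     for ch in code:
--         i = _ORDER.find(ch)
--         if i <= last:
--             mask = -1
--             break
--         last = i
--         mask += 1 << i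
--     if mask > 0:
--         return f"{_MASK_NAMES[mask]} ({code})"
--     return " / ".join(_COLOR_NAMES.get(ch, ch) for ch in code) + f" ({code})"
-- ===== Notes on version B (the rewrite author's own statement) =====
-- stated objective: alternative
-- what changed: Replaced A's cascade of string-keyed dict lookups per length with a single left-to-right scan that builds a 5-bit color bitmask while validating canonical WUBRG order, then indexes a mask-indexed name array; invalid masks fall to the generic per-character join, which also subsumes A's colorless/single-color special cases.
import Mathlib
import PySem

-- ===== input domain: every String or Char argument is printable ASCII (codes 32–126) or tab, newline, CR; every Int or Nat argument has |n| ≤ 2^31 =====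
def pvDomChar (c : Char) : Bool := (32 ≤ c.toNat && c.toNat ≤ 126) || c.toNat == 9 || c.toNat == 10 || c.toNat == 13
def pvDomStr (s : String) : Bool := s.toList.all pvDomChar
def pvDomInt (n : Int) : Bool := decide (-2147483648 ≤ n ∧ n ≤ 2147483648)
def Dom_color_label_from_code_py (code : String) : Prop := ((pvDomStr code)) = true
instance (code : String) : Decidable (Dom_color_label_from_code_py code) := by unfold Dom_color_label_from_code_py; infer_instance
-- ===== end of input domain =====

-- B replaces A's per-length cascade of string-keyed dict lookups with a single scan that
-- builds a 5-bit color bitmask while validating canonical WUBRG order, then indexes a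
-- mask-indexed name array; invalid masks fall to the generic per-character join.

-- Shared: both Pythons contain the identical generic-join expression
-- '" / ".join(_COLOR_NAMES.get(ch, ch) for ch in code) + f" ({code})"'.
def colorNames : PySem.Dict String String := PySem.Dict.mk
  [("W", "White"), ("U", "Blue"), ("B", "Black"), ("R", "Red"), ("G", "Green"), ("C", "Colorless")]

def genericJoin (code : String) : String :=
  PySem.Str.join " / "
    (code.toList.map (fun ch => colorNames.getD (String.singleton ch) (String.singleton ch)))
    ++ " (" ++ code ++ ")"

-- ===== PORT A =====
def twoColorLabels : PySem.Dict String String := PySem.Dict.mk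
  [("WU", "Azorius"), ("UB", "Dimir"), ("BR", "Rakdos"), ("RG", "Gruul"), ("WG", "Selesnya"),
   ("WB", "Orzhov"), ("UR", "Izzet"), ("BG", "Golgari"), ("WR", "Boros"), ("UG", "Simic")]

def threeColorLabels : PySem.Dict String String := PySem.Dict.mk
  [("WUB", "Esper"), ("UBR", "Grixis"), ("BRG", "Jund"), ("WRG", "Naya"), ("WUG", "Bant"),
   ("WBR", "Mardu"), ("WUR", "Jeskai"), ("UBG", "Sultai"), ("URG", "Temur"), ("WBG", "Abzan")]

def fourColorLabels : PySem.Dict String String := PySem.Dict.mk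
  [("WUBR", "Yore-Tiller"), ("WUBG", "Witch-Maw"), ("WURG", "Ink-Treader"),
   ("WBRG", "Dune-Brood"), ("UBRG", "Glint-Eye")]

def color_label_from_code_py (code : String) : String :=
  if code = "" then ""
  else if code = "C" then "Colorless (C)"
  else if code.length = 1 then
    let base := colorNames.getD code code
    base ++ " (" ++ code ++ ")"
  else
    -- 'if label:' falls through when the lookup misses (None); values are never "".
    match (if code.length = 2 then twoColorLabels.get? code else none) with
    | some label => label ++ " (" ++ code ++ ")"
    | none =>
      match (if code.length = 3 then threeColorLabels.get? code else none) with
      | some label => label ++ " (" ++ code ++ ")"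
      | none =>
        match (if code.length = 4 then fourColorLabels.get? code else none) with
        | some label => label ++ " (" ++ code ++ ")"
        | none =>
          if code = "WUBRG" then "Five-Color (WUBRG)"
          else genericJoin code

-- ===== PORT B =====
-- _MASK_NAMES: names indexed by the 5-bit color mask (bit 0 = W … bit 4 = G); index 0 unused.
def maskNames : List String :=
  ["", "White", "Blue", "Azorius", "Black", "Orzhov", "Dimir", "Esper",
   "Red", "Boros", "Izzet", "Jeskai", "Rakdos", "Mardu", "Grixis", "Yore-Tiller",
   "Green", "Selesnya", "Simic", "Bant", "Golgari", "Abzan", "Sultai", "Witch-Maw",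
   "Gruul", "Naya", "Temur", "Ink-Treader", "Jund", "Dune-Brood", "Glint-Eye", "Five-Color"]

-- the for-loop of Source B: i = _ORDER.find(ch); break to -1 on a violation, else mask += 1 << i
def scanMask : List Char → Int → Int → Int
  | [], _, mask => mask
  | ch :: rest, last, mask =>
    let i : Int := PySem.Str.find "WUBRG" (String.singleton ch)
    if i ≤ last then -1
    else scanMask rest i (mask + 2 ^ i.toNat)

def color_label_from_code_py_alt (code : String) : String :=
  if code = "" then ""
  else
    let mask := scanMask code.toList (-1) 0
    if mask > 0 then
      -- mask ∈ [1, 31] whenever it is positive, so the list index never misses ('getD ""' unreachable)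
      (PySem.List.pyGet? maskNames mask).getD "" ++ " (" ++ code ++ ")"
    else genericJoin code

-- ===== PRECONDITION & SPEC =====
def Spec_color_label_from_code_py (code : String) (out : String) : Prop := out = color_label_from_code_py_alt code
instance (code : String) (out : String) : Decidable (Spec_color_label_from_code_py code out) := by unfold Spec_color_label_from_code_py; infer_instance

-- ===== CLAIM (what is proved, stated in full; the proofs are below) =====
def Claim_equal_color_label_from_code_py : Prop := ∀ (code : String), Dom_color_label_from_code_py code → Spec_color_label_from_code_py code (color_label_from_code_py code)

-- ===== LEMMAS AND PROOFS =====

theorem generic_single (s : String) (h : s.length = 1) :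
    genericJoin s = colorNames.getD s s ++ " (" ++ s ++ ")" := by
  have hl : s.toList.length = 1 := by simpa [String.length_toList] using h
  obtain ⟨c, hc⟩ := List.length_eq_one_iff.mp hl
  have hs : s = String.singleton c := by
    have := congrArg String.ofList hc
    simpa [String.singleton] using this
  rw [genericJoin, hc]
  simp [PySem.Str.join, PySem.Chars.join_singleton, ← hs]

theorem find_notin (ch : Char) (h1 : ch ≠ 'W') (h2 : ch ≠ 'U') (h3 : ch ≠ 'B')
    (h4 : ch ≠ 'R') (h5 : ch ≠ 'G') :
    PySem.Str.find "WUBRG" (String.singleton ch) = -1 := by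
  rw [PySem.Str.find_eq_neg_one_iff]
  intro h
  have hm : ch ∈ "WUBRG".toList := h.subset (by simp [String.singleton])
  simp at hm
  tauto

theorem dropLe (k v : Nat) (hk : k ≤ v) (hv : v ≤ 5) :
    List.Sublist (List.drop v ['W','U','B','R','G']) (List.drop k ['W','U','B','R','G']) := by
  interval_cases v <;> interval_cases k <;> decide

-- a scan that does not fail only accepts strictly increasing WUBRG positions beyond `last`
theorem scan_sublist : ∀ (cs : List Char) (last mask : Int), -1 ≤ last →
    0 ≤ scanMask cs last mask →
    List.Sublist cs (List.drop (last + 1).toNat ['W','U','B','R','G'])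
  | [], _, _, _, _ => List.nil_sublist _
  | ch :: rest, last, mask, hlast, h => by
    rw [scanMask] at h
    by_cases hW : ch = 'W'
    · -- ch = 'W', i = 0
      subst hW
      simp only [show PySem.Str.find "WUBRG" (String.singleton 'W') = 0 from rfl] at h
      by_cases hif : (0 : Int) ≤ last
      · simp [hif] at h
      · simp [hif] at h
        have hrest := scan_sublist rest 0 (mask + 1) (by omega) h
        have hk : (last + 1).toNat = 0 := by omega
        rw [hk]
        exact (hrest.cons₂ 'W').trans (dropLe 0 0 le_rfl (by omega))
    by_cases hU : ch = 'U'
    · subst hU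
      simp only [show PySem.Str.find "WUBRG" (String.singleton 'U') = 1 from rfl] at h
      by_cases hif : (1 : Int) ≤ last
      · simp [hif] at h
      · simp [hif] at h
        have hrest := scan_sublist rest 1 (mask + 2) (by omega) h
        have hk : (last + 1).toNat ≤ 1 := by omega
        exact (hrest.cons₂ 'U').trans (dropLe (last + 1).toNat 1 hk (by omega))
    by_cases hB : ch = 'B'
    · subst hB
      simp only [show PySem.Str.find "WUBRG" (String.singleton 'B') = 2 from rfl] at h
      by_cases hif : (2 : Int) ≤ last
      · simp [hif] at h
      · simp [hif] at h
        have hrest := scan_sublist rest 2 (mask + 4) (by omega) h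
        have hk : (last + 1).toNat ≤ 2 := by omega
        exact (hrest.cons₂ 'B').trans (dropLe (last + 1).toNat 2 hk (by omega))
    by_cases hR : ch = 'R'
    · subst hR
      simp only [show PySem.Str.find "WUBRG" (String.singleton 'R') = 3 from rfl] at h
      by_cases hif : (3 : Int) ≤ last
      · simp [hif] at h
      · simp [hif] at h
        have hrest := scan_sublist rest 3 (mask + 8) (by omega) h
        have hk : (last + 1).toNat ≤ 3 := by omega
        exact (hrest.cons₂ 'R').trans (dropLe (last + 1).toNat 3 hk (by omega))
    by_cases hG : ch = 'G'
    · subst hG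
      simp only [show PySem.Str.find "WUBRG" (String.singleton 'G') = 4 from rfl] at h
      by_cases hif : (4 : Int) ≤ last
      · simp [hif] at h
      · simp [hif] at h
        have hrest := scan_sublist rest 4 (mask + 16) (by omega) h
        have hk : (last + 1).toNat ≤ 4 := by omega
        exact (hrest.cons₂ 'G').trans (dropLe (last + 1).toNat 4 hk (by omega))
    · -- ch not a color character: find = -1 ≤ last, the scan fails
      rw [find_notin ch hW hU hB hR hG] at h
      simp [show (-1 : Int) ≤ last from hlast] at h

-- ===== VERDICT (by name: the statement is the Claim_ definition above) =====
theorem color_label_from_code_py_spec : Claim_equal_color_label_from_code_py := by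
  intro code _
  unfold Spec_color_label_from_code_py
  by_cases h0 : code = ""
  · subst h0; decide
  by_cases hm : 0 < scanMask code.toList (-1) 0
  · -- valid canonical code: it is one of the 31 nonempty sublists of "WUBRG"; check each
    have hsub : List.Sublist code.toList (List.drop ((-1 : Int) + 1).toNat ['W','U','B','R','G']) :=
      scan_sublist code.toList (-1) 0 le_rfl (le_of_lt hm)
    have hmem : code.toList ∈ List.sublists ['W','U','B','R','G'] :=
      List.mem_sublists.mpr (by simpa using hsub)
    rw [show List.sublists ['W','U','B','R','G'] = ([[], ['W'], ['U'], ['W', 'U'], ['B'], ['W', 'B'], ['U', 'B'], ['W', 'U', 'B'], ['R'], ['W', 'R'], ['U', 'R'], ['W', 'U', 'R'], ['B', 'R'], ['W', 'B', 'R'], ['U', 'B', 'R'], ['W', 'U', 'B', 'R'], ['G'], ['W', 'G'], ['U', 'G'], ['W', 'U', 'G'], ['B', 'G'], ['W', 'B', 'G'], ['U', 'B', 'G'], ['W', 'U', 'B', 'G'], ['R', 'G'], ['W', 'R', 'G'], ['U', 'R', 'G'], ['W', 'U', 'R', 'G'], ['B', 'R', 'G'], ['W', 'B', 'R', 'G'],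 ['U', 'B', 'R', 'G'], ['W', 'U', 'B', 'R', 'G']] : List (List Char)) from by decide] at hmem
    simp only [List.mem_cons, List.not_mem_nil, or_false] at hmem
    rcases hmem with h|h|h|h|h|h|h|h|h|h|h|h|h|h|h|h|h|h|h|h|h|h|h|h|h|h|h|h|h|h|h|h
    · exact absurd (String.toList_inj.mp (h.trans (show ([] : List Char) = "".toList from by decide))) h0
    · rw [String.toList_inj.mp (h.trans (show (['W'] : List Char) = "W".toList from by decide))]; decide
    · rw [String.toList_inj.mp (h.trans (show (['U'] : List Char) = "U".toList from by decide))]; decide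
    · rw [String.toList_inj.mp (h.trans (show (['W','U'] : List Char) = "WU".toList from by decide))]; decide
    · rw [String.toList_inj.mp (h.trans (show (['B'] : List Char) = "B".toList from by decide))]; decide
    · rw [String.toList_inj.mp (h.trans (show (['W','B'] : List Char) = "WB".toList from by decide))]; decide
    · rw [String.toList_inj.mp (h.trans (show (['U','B'] : List Char) = "UB".toList from by decide))]; decide
    · rw [String.toList_inj.mp (h.trans (show (['W','U','B'] : List Char) = "WUB".toList from by decide))]; decide
    · rw [String.toList_inj.mp (h.trans (show (['R'] : List Char) = "R".toList from by decide))]; decide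
    · rw [String.toList_inj.mp (h.trans (show (['W','R'] : List Char) = "WR".toList from by decide))]; decide
    · rw [String.toList_inj.mp (h.trans (show (['U','R'] : List Char) = "UR".toList from by decide))]; decide
    · rw [String.toList_inj.mp (h.trans (show (['W','U','R'] : List Char) = "WUR".toList from by decide))]; decide
    · rw [String.toList_inj.mp (h.trans (show (['B','R'] : List Char) = "BR".toList from by decide))]; decide
    · rw [String.toList_inj.mp (h.trans (show (['W','B','R'] : List Char) = "WBR".toList from by decide))]; decide
    · rw [String.toList_inj.mp (h.trans (show (['U','B','R'] : List Char) = "UBR".toList from by decide))]; decide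
    · rw [String.toList_inj.mp (h.trans (show (['W','U','B','R'] : List Char) = "WUBR".toList from by decide))]; decide
    · rw [String.toList_inj.mp (h.trans (show (['G'] : List Char) = "G".toList from by decide))]; decide
    · rw [String.toList_inj.mp (h.trans (show (['W','G'] : List Char) = "WG".toList from by decide))]; decide
    · rw [String.toList_inj.mp (h.trans (show (['U','G'] : List Char) = "UG".toList from by decide))]; decide
    · rw [String.toList_inj.mp (h.trans (show (['W','U','G'] : List Char) = "WUG".toList from by decide))]; decide
    · rw [String.toList_inj.mp (h.trans (show (['B','G'] : List Char) = "BG".toList from by decide))]; decide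
    · rw [String.toList_inj.mp (h.trans (show (['W','B','G'] : List Char) = "WBG".toList from by decide))]; decide
    · rw [String.toList_inj.mp (h.trans (show (['U','B','G'] : List Char) = "UBG".toList from by decide))]; decide
    · rw [String.toList_inj.mp (h.trans (show (['W','U','B','G'] : List Char) = "WUBG".toList from by decide))]; decide
    · rw [String.toList_inj.mp (h.trans (show (['R','G'] : List Char) = "RG".toList from by decide))]; decide
    · rw [String.toList_inj.mp (h.trans (show (['W','R','G'] : List Char) = "WRG".toList from by decide))]; decide
    · rw [String.toList_inj.mp (h.trans (show (['U','R','G'] : List Char) = "URG".toList from by decide))]; decide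
    · rw [String.toList_inj.mp (h.trans (show (['W','U','R','G'] : List Char) = "WURG".toList from by decide))]; decide
    · rw [String.toList_inj.mp (h.trans (show (['B','R','G'] : List Char) = "BRG".toList from by decide))]; decide
    · rw [String.toList_inj.mp (h.trans (show (['W','B','R','G'] : List Char) = "WBRG".toList from by decide))]; decide
    · rw [String.toList_inj.mp (h.trans (show (['U','B','R','G'] : List Char) = "UBRG".toList from by decide))]; decide
    · rw [String.toList_inj.mp (h.trans (show (['W','U','B','R','G'] : List Char) = "WUBRG".toList from by decide))]; decide
  · -- invalid scan: B takes the generic join; show A does too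
    by_cases hC : code = "C"
    · subst hC; decide
    have hk0 : code ≠ "WU" := by rintro rfl; exact hm (by decide)
    have hk1 : code ≠ "UB" := by rintro rfl; exact hm (by decide)
    have hk2 : code ≠ "BR" := by rintro rfl; exact hm (by decide)
    have hk3 : code ≠ "RG" := by rintro rfl; exact hm (by decide)
    have hk4 : code ≠ "WG" := by rintro rfl; exact hm (by decide)
    have hk5 : code ≠ "WB" := by rintro rfl; exact hm (by decide)
    have hk6 : code ≠ "UR" := by rintro rfl; exact hm (by decide)
    have hk7 : code ≠ "BG" := by rintro rfl; exact hm (by decide)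
    have hk8 : code ≠ "WR" := by rintro rfl; exact hm (by decide)
    have hk9 : code ≠ "UG" := by rintro rfl; exact hm (by decide)
    have hk10 : code ≠ "WUB" := by rintro rfl; exact hm (by decide)
    have hk11 : code ≠ "UBR" := by rintro rfl; exact hm (by decide)
    have hk12 : code ≠ "BRG" := by rintro rfl; exact hm (by decide)
    have hk13 : code ≠ "WRG" := by rintro rfl; exact hm (by decide)
    have hk14 : code ≠ "WUG" := by rintro rfl; exact hm (by decide)
    have hk15 : code ≠ "WBR" := by rintro rfl; exact hm (by decide)
    have hk16 : code ≠ "WUR" := by rintro rfl; exact hm (by decide)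
    have hk17 : code ≠ "UBG" := by rintro rfl; exact hm (by decide)
    have hk18 : code ≠ "URG" := by rintro rfl; exact hm (by decide)
    have hk19 : code ≠ "WBG" := by rintro rfl; exact hm (by decide)
    have hk20 : code ≠ "WUBR" := by rintro rfl; exact hm (by decide)
    have hk21 : code ≠ "WUBG" := by rintro rfl; exact hm (by decide)
    have hk22 : code ≠ "WURG" := by rintro rfl; exact hm (by decide)
    have hk23 : code ≠ "WBRG" := by rintro rfl; exact hm (by decide)
    have hk24 : code ≠ "UBRG" := by rintro rfl; exact hm (by decide)
    have hk25 : code ≠ "WUBRG" := by rintro rfl; exact hm (by decide)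
    have g2 : twoColorLabels.get? code = none := by
      simp [twoColorLabels, PySem.Dict.get?, beq_iff_eq, Ne.symm hk0, Ne.symm hk1, Ne.symm hk2, Ne.symm hk3, Ne.symm hk4, Ne.symm hk5, Ne.symm hk6, Ne.symm hk7, Ne.symm hk8, Ne.symm hk9]
    have g3 : threeColorLabels.get? code = none := by
      simp [threeColorLabels, PySem.Dict.get?, beq_iff_eq, Ne.symm hk10, Ne.symm hk11, Ne.symm hk12, Ne.symm hk13, Ne.symm hk14, Ne.symm hk15, Ne.symm hk16, Ne.symm hk17, Ne.symm hk18, Ne.symm hk19]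
    have g4 : fourColorLabels.get? code = none := by
      simp [fourColorLabels, PySem.Dict.get?, beq_iff_eq, Ne.symm hk20, Ne.symm hk21, Ne.symm hk22, Ne.symm hk23, Ne.symm hk24]
    have hB : color_label_from_code_py_alt code = genericJoin code := by
      rw [color_label_from_code_py_alt]
      simp [h0, hm]
    by_cases hlen : code.length = 1
    · rw [hB, color_label_from_code_py]
      simp [h0, hC, hlen, generic_single code hlen]
    · rw [hB, color_label_from_code_py]
      simp [h0, hC, hlen, g2, g3, g4, hk25]
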